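-- pv_equiv track=rewrite | github.com/PureStorage-OpenConnect/cloudblockstore-scripts | tagging-graffiti-solution/add_customer_tags.py | create_modified_template
-- ===== SOURCE A (Python) =====
-- def append_tags(modified_lines, tag_array, leading_spaces):
--     for tag in tag_array:
--         modified_lines.append(' ' * leading_spaces + tag)
--
-- def create_modified_template(og_lines, tag_array, tag_array_with_propagation):
--     modified_lines = []
--     skip_lines = 0
--     add_instance_tags = False
--     add_propagate_tags = False
--     for n, line in enumerate(og_lines):
--         modified_lines.append(line)
--         leading_spaces = len(line) - len(line.lstrip()) - 2
--         if add_propagate_tags: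
--             add_propagate_tags = False
--             append_tags(modified_lines, tag_array_with_propagation, leading_spaces)
--         elif add_instance_tags:
--             add_instance_tags = False
--             modified_lines.append(' ' * (leading_spaces - 2) + '- ResourceType: instance\n')
--             modified_lines.append(' ' * leading_spaces + 'Tags:\n')
--             append_tags(modified_lines, tag_array, leading_spaces)
--         if "Value: 'Pure:CBS'" in line:
--             if "PropagateAtLaunch: " in og_lines[n + 1]:
--                 add_propagate_tags = True
--             else:
--                 append_tags(modified_lines, tag_array, leading_spaces)
--
--     return modified_lines
-- ===== SOURCE B (Python) =====
-- def create_modified_template(og_lines, tag_array, tag_array_with_propagation):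
--     # Staged two-pass: pass 1 scans the markers and builds an insertion map
--     # (line index -> list of indented tag lines to splice in after that line),
--     # pass 2 emits each original line followed by its mapped block.
--     inserts = {}
--     for n, line in enumerate(og_lines):
--         if "Value: 'Pure:CBS'" in line:
--             follower = og_lines[n + 1] if n + 1 < len(og_lines) else None
--             if follower is not None and "PropagateAtLaunch: " in follower:
--                 pad = len(follower) - len(follower.lstrip()) - 2
--                 inserts.setdefault(n + 1, []).extend(' ' * pad + t for t in tag_array_with_propagation)
--             else:
--                 pad = len(line) - len(line.lstrip()) - 2
--                 inserts.setdefault(n, []).extend(' ' * pad + t for t in tag_array)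
--     out = []
--     for n, line in enumerate(og_lines):
--         out.append(line)
--         out.extend(inserts.get(n, ()))
--     return out
-- ===== Notes on version B (the rewrite author's own statement) =====
-- stated objective: alternative
-- what changed: Replaced A's stateful single pass (dead skip_lines/add_instance_tags state and a deferred add_propagate_tags flag consumed on the next iteration) by two staged passes: the first scans the marker lines and builds a dict mapping line index to the tag block to splice in after it, the second emits each line followed by its mapped block.
import Mathlib
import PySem

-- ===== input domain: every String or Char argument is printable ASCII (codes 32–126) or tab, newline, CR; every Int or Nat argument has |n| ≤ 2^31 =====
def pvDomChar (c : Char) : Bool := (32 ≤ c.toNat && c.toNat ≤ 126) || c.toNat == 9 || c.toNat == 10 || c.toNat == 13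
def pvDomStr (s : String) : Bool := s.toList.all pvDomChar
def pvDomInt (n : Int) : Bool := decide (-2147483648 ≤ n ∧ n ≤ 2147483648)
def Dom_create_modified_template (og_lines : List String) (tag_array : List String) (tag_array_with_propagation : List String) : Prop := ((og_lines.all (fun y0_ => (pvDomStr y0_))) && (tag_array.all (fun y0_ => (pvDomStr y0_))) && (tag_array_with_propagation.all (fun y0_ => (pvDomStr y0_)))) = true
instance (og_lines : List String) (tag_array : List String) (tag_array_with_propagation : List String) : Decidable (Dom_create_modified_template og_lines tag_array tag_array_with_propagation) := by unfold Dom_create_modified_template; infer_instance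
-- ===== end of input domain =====

-- B replaces A's stateful single pass by two staged passes: pass 1 builds an index → tag-block
-- insertion map from the marker lines, pass 2 splices the blocks in (objective: alternative).

-- ===== PORT A =====
-- append_tags: for tag in tag_array: modified_lines.append(' ' * leading_spaces + tag)
def pvAppendTags (modified_lines : List String) (tag_array : List String) (leading_spaces : Int) : List String :=
  tag_array.foldl (fun acc tag => acc ++ [String.mk (List.replicate leading_spaces.toNat ' ' ++ tag.toList)]) modified_lines

-- the enumerate loop: n is the index, the last argument is og_lines.drop n; og_lines[n + 1]
-- is read via pyGet? (none = IndexError, excluded by Pre_; getD "" is the total stand-in)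
def pvLoopA (og_lines ta twp : List String) (n : Nat) (acc : List String)
    (add_instance_tags add_propagate_tags : Bool) : List String → List String
  | [] => acc
  | line :: rest =>
    let acc1 := acc ++ [line]
    let ls : Int := PySem.Str.len line - PySem.Str.len (PySem.Str.lstrip line) - 2
    let acc2 :=
      if add_propagate_tags then pvAppendTags acc1 twp ls
      else if add_instance_tags then
        pvAppendTags (acc1 ++ [String.mk (List.replicate (ls - 2).toNat ' ' ++ "- ResourceType: instance\n".toList),
                               String.mk (List.replicate ls.toNat ' ' ++ "Tags:\n".toList)]) ta ls
      else acc1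
    let ait2 := if add_propagate_tags then add_instance_tags else false
    if PySem.Str.isIn "Value: 'Pure:CBS'" line then
      if PySem.Str.isIn "PropagateAtLaunch: " ((PySem.List.pyGet? og_lines ((n : Int) + 1)).getD "") then
        pvLoopA og_lines ta twp (n + 1) acc2 ait2 true rest
      else
        pvLoopA og_lines ta twp (n + 1) (pvAppendTags acc2 ta ls) ait2 false rest
    else
      pvLoopA og_lines ta twp (n + 1) acc2 ait2 false rest

def create_modified_template (og_lines : List String) (tag_array : List String) (tag_array_with_propagation : List String) : List String :=
  pvLoopA og_lines tag_array tag_array_with_propagation 0 [] false false og_lines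

-- ===== PORT B =====
-- [' ' * pad + t for t in xs]
def pvBlock (xs : List String) (pad : Int) : List String :=
  xs.map (fun t => String.mk (List.replicate pad.toNat ' ' ++ t.toList))

-- pass 1: for n, line in enumerate(og_lines): … inserts.setdefault(k, []).extend(block)
-- (setdefault+extend on a fresh or existing entry = inserts[k] = inserts.get(k, []) + block);
-- n is the index, the last argument is og_lines.drop n; og_lines[n+1] if n+1 < len else None is og_lines[n+1]?
def pvBuildInserts (og ta twp : List String) (n : Nat) (d : PySem.Dict Nat (List String)) :
    List String → PySem.Dict Nat (List String)
  | [] => d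
  | line :: rest =>
    if PySem.Str.isIn "Value: 'Pure:CBS'" line then
      match og[n + 1]? with
      | some f =>
        if PySem.Str.isIn "PropagateAtLaunch: " f then
          pvBuildInserts og ta twp (n + 1)
            (d.insert (n + 1) (d.getD (n + 1) [] ++
              pvBlock twp (PySem.Str.len f - PySem.Str.len (PySem.Str.lstrip f) - 2))) rest
        else
          pvBuildInserts og ta twp (n + 1)
            (d.insert n (d.getD n [] ++
              pvBlock ta (PySem.Str.len line - PySem.Str.len (PySem.Str.lstrip line) - 2))) rest
      | none =>
        pvBuildInserts og ta twp (n + 1)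
          (d.insert n (d.getD n [] ++
            pvBlock ta (PySem.Str.len line - PySem.Str.len (PySem.Str.lstrip line) - 2))) rest
    else pvBuildInserts og ta twp (n + 1) d rest

-- pass 2: out.append(line); out.extend(inserts.get(n, ()))
def pvEmit (d : PySem.Dict Nat (List String)) (n : Nat) : List String → List String
  | [] => []
  | line :: rest => line :: (d.getD n [] ++ pvEmit d (n + 1) rest)

def create_modified_template_alt (og_lines : List String) (tag_array : List String) (tag_array_with_propagation : List String) : List String :=
  pvEmit (pvBuildInserts og_lines tag_array tag_array_with_propagation 0 PySem.Dict.empty og_lines) 0 og_lines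

-- ===== PRECONDITION & SPEC =====
-- Pre_ excludes exactly the inputs where Python A raises IndexError: a last line containing
-- "Value: 'Pure:CBS'" makes A read og_lines[n + 1] past the end of the list.
def Pre_create_modified_template (og_lines : List String) (tag_array : List String) (tag_array_with_propagation : List String) : Prop :=
  og_lines.getLast?.all (fun l => ! PySem.Str.isIn "Value: 'Pure:CBS'" l) = true
instance (og_lines : List String) (tag_array : List String) (tag_array_with_propagation : List String) : Decidable (Pre_create_modified_template og_lines tag_array tag_array_with_propagation) := by unfold Pre_create_modified_template; infer_instance

def pvWitness_create_modified_template : List String × List String × List String :=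
  (["  Value: 'Pure:CBS'\n", "   PropagateAtLaunch: true\n", "  Tags:\n"], ["T1\n"], ["P1\n"])

def Spec_create_modified_template (og_lines : List String) (tag_array : List String) (tag_array_with_propagation : List String) (out : List String) : Prop := out = create_modified_template_alt og_lines tag_array tag_array_with_propagation
instance (og_lines : List String) (tag_array : List String) (tag_array_with_propagation : List String) (out : List String) : Decidable (Spec_create_modified_template og_lines tag_array tag_array_with_propagation out) := by unfold Spec_create_modified_template; infer_instance

-- ===== CLAIM (what is proved, stated in full; the proofs are below) =====
def Claim_equal_create_modified_template : Prop := ∀ (og_lines : List String) (tag_array : List String) (tag_array_with_propagation : List String), Dom_create_modified_template og_lines tag_array tag_array_with_propagation → Pre_create_modified_template og_lines tag_array tag_array_with_propagation → Spec_create_modified_template og_lines tag_array tag_array_with_propagation (create_modified_template og_lines tag_array tag_array_with_propagation)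

-- ===== LEMMAS AND PROOFS =====

-- was the previous line a "Value: 'Pure:CBS'" line?
def pvPrevV (og : List String) : Nat → Bool
  | 0 => false
  | m + 1 =>
    match og[m]? with
    | some p => PySem.Str.isIn "Value: 'Pure:CBS'" p
    | none => false

-- the propagation block spliced in after line m, and the plain block after line m
def pvPB (og twp : List String) (m : Nat) : List String :=
  match og[m]? with
  | none => []
  | some c =>
    if PySem.Str.isIn "PropagateAtLaunch: " c && pvPrevV og m then
      pvBlock twp (PySem.Str.len c - PySem.Str.len (PySem.Str.lstrip c) - 2)
    else []
def pvTB (og ta : List String) (m : Nat) : List String :=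
  match og[m]? with
  | none => []
  | some c =>
    if PySem.Str.isIn "Value: 'Pure:CBS'" c &&
        !(match og[m + 1]? with | some nx => PySem.Str.isIn "PropagateAtLaunch: " nx | none => false) then
      pvBlock ta (PySem.Str.len c - PySem.Str.len (PySem.Str.lstrip c) - 2)
    else []

-- stateless reference recursion (the common meeting point of the two ports);
-- pv says whether the previous line was a "Value: 'Pure:CBS'" line
def pvRef (ta twp : List String) (pv : Bool) : List String → List String
  | [] => []
  | line :: rest =>
    line ::
      ((if PySem.Str.isIn "PropagateAtLaunch: " line && pv then
          pvBlock twp (PySem.Str.len line - PySem.Str.len (PySem.Str.lstrip line) - 2)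
        else []) ++
       ((if PySem.Str.isIn "Value: 'Pure:CBS'" line &&
            !(match rest.head? with | some nx => PySem.Str.isIn "PropagateAtLaunch: " nx | none => false) then
           pvBlock ta (PySem.Str.len line - PySem.Str.len (PySem.Str.lstrip line) - 2)
         else []) ++
        pvRef ta twp (PySem.Str.isIn "Value: 'Pure:CBS'" line) rest))

theorem pvAppendTags_eq (tag_array : List String) (modified_lines : List String) (k : Int) :
    pvAppendTags modified_lines tag_array k = modified_lines ++ pvBlock tag_array k := by
  induction tag_array generalizing modified_lines with
  | nil => simp [pvAppendTags, pvBlock]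
  | cons t ts ih =>
    simp only [pvAppendTags, List.foldl_cons, pvBlock, List.map_cons] at *
    rw [ih, List.append_assoc]
    rfl

theorem pvLoopA_eq_pvRef (og ta twp : List String) :
    ∀ (rem : List String) (n : Nat) (acc : List String) (pv : Bool) (f : Bool),
      rem = og.drop n →
      f = (match rem.head? with
           | some h => pv && PySem.Str.isIn "PropagateAtLaunch: " h
           | none => false) →
      pvLoopA og ta twp n acc false f rem = acc ++ pvRef ta twp pv rem := by
  intro rem
  induction rem with
  | nil => intro n acc pv f _ _; simp [pvLoopA, pvRef]
  | cons line rest ih =>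
    intro n acc pv f hdrop hf
    have hrest : rest = og.drop (n + 1) := by
      have := congrArg List.tail hdrop
      simpa [List.tail_drop] using this
    have hnext : (PySem.List.pyGet? og ((n : Int) + 1)).getD "" = rest.head?.getD "" := by
      have h1 : ((n : Int) + 1) = ((n + 1 : Nat) : Int) := by push_cast; ring
      rw [h1, PySem.List.pyGet?_natCast, hrest, ← List.head?_drop]
    have hb : PySem.Str.isIn "PropagateAtLaunch: " ((PySem.List.pyGet? og ((n : Int) + 1)).getD "")
        = (match rest.head? with
           | some nx => PySem.Str.isIn "PropagateAtLaunch: " nx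
           | none => false) := by
      rw [hnext]; cases rest with
      | nil => simp; decide
      | cons nx _ => simp
    have hform : (match rest.head? with
                  | some h => PySem.Str.isIn "Value: 'Pure:CBS'" line && PySem.Str.isIn "PropagateAtLaunch: " h
                  | none => false)
        = (PySem.Str.isIn "Value: 'Pure:CBS'" line
            && (match rest.head? with | some nx => PySem.Str.isIn "PropagateAtLaunch: " nx | none => false)) := by
      cases rest.head? <;> simp
    have ih' : ∀ acc' : List String,
        pvLoopA og ta twp (n + 1) acc' false
          (PySem.Str.isIn "Value: 'Pure:CBS'" line
            && (match rest.head? with | some nx => PySem.Str.isIn "PropagateAtLaunch: " nx | none => false)) rest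
          = acc' ++ pvRef ta twp (PySem.Str.isIn "Value: 'Pure:CBS'" line) rest :=
      fun acc' => ih (n + 1) acc' (PySem.Str.isIn "Value: 'Pure:CBS'" line) _ hrest hform.symm
    subst hf
    have hf' : (match (line :: rest).head? with
                | some h => pv && PySem.Str.isIn "PropagateAtLaunch: " h
                | none => false)
        = (pv && PySem.Str.isIn "PropagateAtLaunch: " line) := by
      simp
    rw [hf']
    cases hp : pv <;>
    cases hl : PySem.Str.isIn "PropagateAtLaunch: " line <;>
    cases hv : PySem.Str.isIn "Value: 'Pure:CBS'" line <;>
    cases hx : (match rest.head? with | some nx => PySem.Str.isIn "PropagateAtLaunch: " nx | none => false) <;>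
    · have ih2 := ih'
      rw [hv, hx] at ih2
      simp only [Bool.true_and, Bool.false_and] at ih2
      simp only [pvLoopA, pvRef, hb, hl, hv, hx]
      simp [ih2, pvAppendTags_eq, pvBlock, List.append_assoc]

theorem pvGetElem?_none_of_drop_nil (og : List String) (n m : Nat) (h : og.drop n = []) (hm : n ≤ m) :
    og[m]? = none := by
  have hlen : og.length ≤ n := by
    by_contra hlen
    push_neg at hlen
    have := List.drop_eq_nil_iff.mp h
    omega
  exact List.getElem?_eq_none (by omega)

theorem pvBuildInserts_getD (og ta twp : List String) :
    ∀ (rem : List String) (n : Nat) (d : PySem.Dict Nat (List String)),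
      rem = og.drop n → ∀ m,
      (pvBuildInserts og ta twp n d rem).getD m []
        = d.getD m [] ++ (if n < m then pvPB og twp m else []) ++ (if n ≤ m then pvTB og ta m else []) := by
  intro rem
  induction rem with
  | nil =>
    intro n d hdrop m
    simp only [pvBuildInserts]
    by_cases h2 : n ≤ m
    · have hm : og[m]? = none := pvGetElem?_none_of_drop_nil og n m hdrop.symm h2
      have hPB : pvPB og twp m = [] := by simp [pvPB, hm]
      have hTB : pvTB og ta m = [] := by simp [pvTB, hm]
      simp [hPB, hTB]
    · have h1 : ¬ n < m := by omega
      simp [h1, h2]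
  | cons line rest ih =>
    intro n d hdrop m
    have hline : og[n]? = some line := by
      rw [← List.head?_drop, ← hdrop]; rfl
    have hrest : rest = og.drop (n + 1) := by
      have := congrArg List.tail hdrop
      simpa [List.tail_drop] using this
    have key : ∀ d' : PySem.Dict Nat (List String),
        (∀ j, d'.getD j [] = (d.getD j [] ++ (if j = n then pvTB og ta n else [])) ++
              (if j = n + 1 then pvPB og twp (n + 1) else [])) →
        (pvBuildInserts og ta twp (n + 1) d' rest).getD m []
          = d.getD m [] ++ (if n < m then pvPB og twp m else []) ++ (if n ≤ m then pvTB og ta m else []) := by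
      intro d' hd'
      rw [ih (n + 1) d' hrest m, hd' m]
      rcases Nat.lt_trichotomy m n with hmn | hmn | hmn
      · have e1 : ¬ m = n := by omega
        have e2 : ¬ m = n + 1 := by omega
        have e3 : ¬ n + 1 < m := by omega
        have e4 : ¬ n + 1 ≤ m := by omega
        have e5 : ¬ n < m := by omega
        have e6 : ¬ n ≤ m := by omega
        simp [e1, e2, e3, e4, e5, e6]
      · subst hmn
        have e2 : ¬ m = m + 1 := by omega
        have e3 : ¬ m + 1 < m := by omega
        have e4 : ¬ m + 1 ≤ m := by omega
        have e5 : ¬ m < m := by omega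
        simp [e2, e3, e4, e5]
      · by_cases e1 : m = n + 1
        · subst e1
          have e2 : ¬ n + 1 = n := by omega
          have e3 : ¬ n + 1 < n + 1 := by omega
          have e5 : n < n + 1 := by omega
          simp [e2, e3, e5]
        · have e2 : ¬ m = n := by omega
          have e3 : n + 1 < m := by omega
          have e5 : n < m := by omega
          have e6 : n ≤ m := by omega
          simp [e1, e2, e3, e5, e6]
    simp only [pvBuildInserts]
    have hPrevSucc : pvPrevV og (n + 1) = PySem.Str.isIn "Value: 'Pure:CBS'" line := by
      simp only [pvPrevV, hline]
    cases hv : PySem.Str.isIn "Value: 'Pure:CBS'" line with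
    | false =>
      have hTBn : pvTB og ta n = [] := by
        simp only [pvTB, hline, hv, Bool.false_and, Bool.false_eq_true, if_false]
      have hPBn : pvPB og twp (n + 1) = [] := by
        cases hnx : og[n + 1]? with
        | none => simp only [pvPB, hnx]
        | some f =>
          simp only [pvPB, hnx, hPrevSucc, hv, Bool.and_false, Bool.false_eq_true, if_false]
      simp only [hv, Bool.false_eq_true, if_false]
      exact key d (by intro j; simp [hTBn, hPBn])
    | true =>
      simp only [hv, if_true]
      cases hnx : og[n + 1]? with
      | none =>
        have hTBn : pvTB og ta n
            = pvBlock ta (PySem.Str.len line - PySem.Str.len (PySem.Str.lstrip line) - 2) := by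
          simp only [pvTB, hline, hnx, hv, Bool.not_false, Bool.and_true, if_true]
        have hPBn : pvPB og twp (n + 1) = [] := by simp only [pvPB, hnx]
        refine key _ ?_
        intro j
        rw [PySem.Dict.getD_insert]
        by_cases hj : j = n
        · subst hj; simp [hTBn, hPBn]
        · simp [hj, hPBn]
      | some f =>
        cases hpf : PySem.Str.isIn "PropagateAtLaunch: " f with
        | true =>
          have hTBn : pvTB og ta n = [] := by
            simp only [pvTB, hline, hnx, hpf, Bool.not_true, Bool.and_false, Bool.false_eq_true, if_false]
          have hPBn : pvPB og twp (n + 1)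
              = pvBlock twp (PySem.Str.len f - PySem.Str.len (PySem.Str.lstrip f) - 2) := by
            simp only [pvPB, hnx, hPrevSucc, hv, hpf, Bool.and_true, Bool.and_self, if_true]
          simp only [hpf, if_true]
          refine key _ ?_
          intro j
          rw [PySem.Dict.getD_insert]
          by_cases hj : j = n + 1
          · subst hj
            have hne : ¬ (n + 1 = n) := by omega
            simp [hne, hPBn]
          · simp [hj, hTBn]
        | false =>
          have hTBn : pvTB og ta n
              = pvBlock ta (PySem.Str.len line - PySem.Str.len (PySem.Str.lstrip line) - 2) := by
            simp only [pvTB, hline, hnx, hv, hpf, Bool.not_false, Bool.and_true, if_true]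
          have hPBn : pvPB og twp (n + 1) = [] := by
            simp only [pvPB, hnx, hpf, Bool.false_and, Bool.false_eq_true, if_false]
          simp only [hpf, Bool.false_eq_true, if_false]
          refine key _ ?_
          intro j
          rw [PySem.Dict.getD_insert]
          by_cases hj : j = n
          · subst hj; simp [hTBn, hPBn]
          · simp [hj, hPBn]

theorem pvEmit_eq_ref (og ta twp : List String) (D : PySem.Dict Nat (List String))
    (hD : ∀ m, D.getD m [] = pvPB og twp m ++ pvTB og ta m) :
    ∀ (rem : List String) (n : Nat) (pv : Bool),
      rem = og.drop n → pv = pvPrevV og n →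
      pvEmit D n rem = pvRef ta twp pv rem := by
  intro rem
  induction rem with
  | nil => intro n pv _ _; simp [pvEmit, pvRef]
  | cons line rest ih =>
    intro n pv hdrop hpv
    have hline : og[n]? = some line := by
      rw [← List.head?_drop, ← hdrop]; rfl
    have hrest : rest = og.drop (n + 1) := by
      have := congrArg List.tail hdrop
      simpa [List.tail_drop] using this
    have hnext : og[n + 1]? = rest.head? := by
      rw [hrest, ← List.head?_drop]
    have hPBn : pvPB og twp n
        = (if PySem.Str.isIn "PropagateAtLaunch: " line && pv then
             pvBlock twp (PySem.Str.len line - PySem.Str.len (PySem.Str.lstrip line) - 2)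
           else []) := by
      simp only [pvPB, hline, ← hpv]
    have hTBn : pvTB og ta n
        = (if PySem.Str.isIn "Value: 'Pure:CBS'" line &&
              !(match rest.head? with | some nx => PySem.Str.isIn "PropagateAtLaunch: " nx | none => false) then
             pvBlock ta (PySem.Str.len line - PySem.Str.len (PySem.Str.lstrip line) - 2)
           else []) := by
      simp only [pvTB, hline, hnext]
    have hpv' : PySem.Str.isIn "Value: 'Pure:CBS'" line = pvPrevV og (n + 1) := by
      simp only [pvPrevV, hline]
    simp only [pvEmit, pvRef, hD n, hPBn, hTBn, ih (n + 1) _ hrest hpv',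
      List.append_assoc]

theorem pvAlt_eq_ref (og ta twp : List String) :
    create_modified_template_alt og ta twp = pvRef ta twp false og := by
  unfold create_modified_template_alt
  have hD : ∀ m, (pvBuildInserts og ta twp 0 PySem.Dict.empty og).getD m []
      = pvPB og twp m ++ pvTB og ta m := by
    intro m
    rw [pvBuildInserts_getD og ta twp og 0 PySem.Dict.empty (by simp) m]
    by_cases hm : 0 < m
    · simp [hm]
    · have h0 : m = 0 := by omega
      subst h0
      have hz : pvPB og twp 0 = [] := by
        cases h : og[0]? <;> simp [pvPB, h, pvPrevV]
      simp [hz]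
  exact pvEmit_eq_ref og ta twp _ hD og 0 false rfl (by simp [pvPrevV])

-- ===== VERDICT (by name: the statement is the Claim_ definition above) =====
theorem create_modified_template_spec : Claim_equal_create_modified_template := by
  intro og ta twp _ _
  unfold Spec_create_modified_template create_modified_template
  have h := pvLoopA_eq_pvRef og ta twp og 0 [] false false (by simp)
    (by cases og <;> simp)
  rw [pvAlt_eq_ref]
  simpa using h
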